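-- pv_equiv track=rewrite | github.com/postvakje/oeis-sequences | oeis-sequences/OEISsequences.py | A007608
-- ===== SOURCE A (Python) =====
-- def A007608(n):
--     s, q = "", n
--     while q >= 4 or q < 0:
--         q, r = divmod(q, -4)
--         if r < 0:
--             q += 1
--             r += 4
--         s += str(r)
--     return int(str(q) + s[::-1])
-- ===== SOURCE B (Python) =====
-- def A007608(n):
--     # High-digit-first recursion using Python's nonnegative remainder:
--     # the negabase -4 digit is r = q % 4 and the next quotient is (r - q) // 4,
--     # so no divmod(q, -4) fix-up branch is needed; int() is called once.
--     def rep(q):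
--         if 0 <= q <= 3:
--             return str(q)
--         r = q % 4
--         return rep((r - q) // 4) + str(r)
--     return int(rep(n))
-- ===== Notes on version B (the rewrite author's own statement) =====
-- stated objective: alternative
-- what changed: Replaces the accumulate-digits-then-reverse while loop built on divmod(q, -4) with a carry fix-up branch by a high-digit-first recursion that extracts each negabase digit with Python's nonnegative q % 4 and recurses on (r - q) // 4, so there is no fix-up branch and no string reversal.
import Mathlib
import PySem

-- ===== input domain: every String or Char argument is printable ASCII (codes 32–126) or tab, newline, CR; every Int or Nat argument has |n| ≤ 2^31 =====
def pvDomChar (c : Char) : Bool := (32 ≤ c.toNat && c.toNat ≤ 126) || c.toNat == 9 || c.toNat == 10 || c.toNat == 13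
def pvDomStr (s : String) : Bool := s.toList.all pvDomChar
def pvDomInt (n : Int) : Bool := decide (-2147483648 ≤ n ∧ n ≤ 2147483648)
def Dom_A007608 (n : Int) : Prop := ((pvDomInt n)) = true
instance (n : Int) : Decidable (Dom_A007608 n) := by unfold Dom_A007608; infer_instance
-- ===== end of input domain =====

-- B replaces A's accumulate-and-reverse while loop (built on divmod(q, -4) plus a carry
-- fix-up branch) by a high-digit-first recursion that extracts each digit with Python's
-- nonnegative q % 4 and recurses on (r - q) // 4 (objective: alternative).
-- Python str values are ported as List Char via PySem.Chars/PySem.Int.toChars (exact).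

-- termination measure bound for A's quotient update, cited by A007608loop's decreasing_by
theorem pvMeasureA_lt (q f r : Int) (hfr : f * (-4) + r = q) (hlo : -4 < r) (hhi : r ≤ 0)
    (hq : 4 ≤ q ∨ q < 0) :
    2 * (if r < 0 then f + 1 else f).natAbs + (if (if r < 0 then f + 1 else f) < 0 then 1 else 0)
      < 2 * q.natAbs + (if q < 0 then 1 else 0) := by
  split_ifs <;> omega

-- ===== PORT A =====
-- the while loop of A: state (q, s); on exit, int(str(q) + s[::-1])
def A007608loop (q : Int) (s : List Char) : Int :=
  if h : 4 ≤ q ∨ q < 0 then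
    let f := PySem.Int.floordiv q (-4)      -- q, r = divmod(q, -4)
    let r := PySem.Int.mod q (-4)
    -- if r < 0: q += 1; r += 4
    A007608loop (if r < 0 then f + 1 else f)
      (s ++ PySem.Int.toChars (if r < 0 then r + 4 else r))      -- s += str(r)
  else
    -- int(str(q) + s[::-1]); int() is exact via PySem.Int.ofChars? (never none here)
    (PySem.Int.ofChars? (PySem.Int.toChars q ++ ((PySem.List.slice? s none none (-1)).getD []))).getD 0
termination_by 2 * q.natAbs + (if q < 0 then 1 else 0)
decreasing_by
  exact pvMeasureA_lt q _ _ (PySem.Int.floordiv_mul_add_mod q (-4))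
    (PySem.Int.mod_neg_bounds (a := q) (by norm_num)).1
    (PySem.Int.mod_neg_bounds (a := q) (by norm_num)).2 h

def A007608 (n : Int) : Int := A007608loop n []

-- termination bound for B's quotient (r - q) // 4, cited by A007608rep's decreasing_by
theorem pvMeasureB_lt (q k r f : Int) (hk : k * 4 + r = q) (hr0 : 0 ≤ r) (hr4 : r < 4)
    (hf : f * 4 + PySem.Int.mod (r - q) 4 = r - q) (hm0 : 0 ≤ PySem.Int.mod (r - q) 4)
    (hm4 : PySem.Int.mod (r - q) 4 < 4) (hq : ¬ (0 ≤ q ∧ q ≤ 3)) :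
    f.natAbs * 2 + (if 0 ≤ f then 0 else 1) < q.natAbs * 2 + (if 0 ≤ q then 0 else 1) := by
  split_ifs <;> omega

-- ===== PORT B =====
-- rep(q): the negabase -4 digit string of q, most significant digit first
def A007608rep (q : Int) : List Char :=
  if hb : 0 ≤ q ∧ q ≤ 3 then PySem.Int.toChars q
  else
    let r := PySem.Int.mod q 4                              -- r = q % 4
    A007608rep (PySem.Int.floordiv (r - q) 4) ++ PySem.Int.toChars r   -- rep((r - q) // 4) + str(r)
termination_by q.natAbs * 2 + (if 0 ≤ q then 0 else 1)
decreasing_by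
  exact pvMeasureB_lt q (PySem.Int.floordiv q 4) (PySem.Int.mod q 4) _
    (PySem.Int.floordiv_mul_add_mod q 4)
    (PySem.Int.mod_nonneg (a := q) (by norm_num))
    (PySem.Int.mod_lt (a := q) (by norm_num))
    (PySem.Int.floordiv_mul_add_mod (PySem.Int.mod q 4 - q) 4)
    (PySem.Int.mod_nonneg (a := PySem.Int.mod q 4 - q) (by norm_num))
    (PySem.Int.mod_lt (a := PySem.Int.mod q 4 - q) (by norm_num)) hb

def A007608_alt (n : Int) : Int := (PySem.Int.ofChars? (A007608rep n)).getD 0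

-- ===== PRECONDITION & SPEC =====
def Spec_A007608 (n : Int) (out : Int) : Prop := out = A007608_alt n
instance (n : Int) (out : Int) : Decidable (Spec_A007608 n out) := by unfold Spec_A007608; infer_instance

-- ===== CLAIM (what is proved, stated in full; the proofs are below) =====
def Claim_equal_A007608 : Prop := ∀ (n : Int), Dom_A007608 n → Spec_A007608 n (A007608 n)

-- ===== LEMMAS AND PROOFS =====

-- A's fixed-up divmod(q, -4) step equals B's (q % 4, (q % 4 - q) // 4) step
theorem pvStep_quot (q : Int) :
    (if PySem.Int.mod q (-4) < 0 then PySem.Int.floordiv q (-4) + 1 else PySem.Int.floordiv q (-4))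
      = PySem.Int.floordiv (PySem.Int.mod q 4 - q) 4 := by
  have h1 := PySem.Int.floordiv_mul_add_mod q (-4)
  have h2 := PySem.Int.mod_neg_bounds (a := q) (b := -4) (by norm_num)
  have h3 := PySem.Int.floordiv_mul_add_mod q 4
  have h4 := PySem.Int.mod_nonneg (a := q) (b := 4) (by norm_num)
  have h5 := PySem.Int.mod_lt (a := q) (b := 4) (by norm_num)
  have h6 := PySem.Int.floordiv_mul_add_mod (PySem.Int.mod q 4 - q) 4
  have h7 := PySem.Int.mod_nonneg (a := PySem.Int.mod q 4 - q) (b := 4) (by norm_num)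
  have h8 := PySem.Int.mod_lt (a := PySem.Int.mod q 4 - q) (b := 4) (by norm_num)
  split_ifs <;> omega

theorem pvStep_rem (q : Int) :
    (if PySem.Int.mod q (-4) < 0 then PySem.Int.mod q (-4) + 4 else PySem.Int.mod q (-4))
      = PySem.Int.mod q 4 := by
  have h1 := PySem.Int.floordiv_mul_add_mod q (-4)
  have h2 := PySem.Int.mod_neg_bounds (a := q) (b := -4) (by norm_num)
  have h3 := PySem.Int.floordiv_mul_add_mod q 4
  have h4 := PySem.Int.mod_nonneg (a := q) (b := 4) (by norm_num)
  have h5 := PySem.Int.mod_lt (a := q) (b := 4) (by norm_num)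
  split_ifs <;> omega

-- str(r) for a single negabase digit is one character, hence its own reverse
theorem pvToChars_digit_reverse (r : Int) (h0 : 0 ≤ r) (h3 : r ≤ 3) :
    (PySem.Int.toChars r).reverse = PySem.Int.toChars r := by
  interval_cases r <;> decide

-- loop invariant: the loop with state (q, s) returns int(rep(q) + s[::-1])
theorem pvLoop_eq_rep (q : Int) (s : List Char) :
    A007608loop q s = (PySem.Int.ofChars? (A007608rep q ++ s.reverse)).getD 0 := by
  fun_induction A007608loop q s with
  | case1 q s h f r ih =>
    have h2 := PySem.Int.mod_neg_bounds (a := q) (b := -4) (by norm_num)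
    rw [A007608rep, dif_neg (by omega)]
    simp only [dite_eq_ite] at ih
    rw [ih, List.reverse_append,
      pvToChars_digit_reverse _ (by split_ifs <;> omega) (by split_ifs <;> omega),
      pvStep_quot q, pvStep_rem q, List.append_assoc]
  | case2 q s h =>
    rw [A007608rep, dif_pos (by omega), PySem.List.slice?_none_none_neg_one, Option.getD_some]

-- ===== VERDICT (by name: the statement is the Claim_ definition above) =====
theorem A007608_spec : Claim_equal_A007608 := by
  intro n _
  unfold Spec_A007608 A007608 A007608_alt
  rw [pvLoop_eq_rep, List.reverse_nil, List.append_nil]
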